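-- pv_equiv track=rewrite | github.com/Massprod/leetcode-testing | leetcode_problems/p1531_string_compression_ii.py | get_length_of_optim_compression
-- ===== SOURCE A (Python) =====
-- from functools import cache
--
-- def get_length_of_optim_compression(s: str, k: int) -> int:
--     # working_sol (97%, 91%) -> (1197ms, 20.9mb)  time: O(n ** 2 * k) | space: O(n * k)
--
--     @cache
--     def check(index: int, deletions: int) -> int:
--         if index == -1:
--             return 0
--         out: int = 10000
--         # Delete any single symbol, if we can.
--         if deletions > 0:
--             out = check(index - 1, deletions - 1)
--         symbol: str = s[index]
--         streak: int = 0
--         deleted: int = 0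
--         # Or try to continue streak(sequence) with that symbol as far as we can.
--         # Until we hit another symbol, delete other symbols while we can delete them.
--         # And find maximum sequence we can have with that `s[index]` symbol.
--         # To cover cases like: 'aaabcdaaa', we can continue 'a3' as 'a6' with deletion of 'bcd'.
--         for x in range(index, -1, - 1):
--             if symbol == s[x]:
--                 streak += 1
--             else:
--                 deleted += 1
--             # We can't delete more than 'k' times, or what's left of it == 'deletions'.
--             if deleted > deletions:
--                 break
--             if streak == 1:
--                 streak_length: int = 0
--             else:
--                 streak_length = len(str(streak))
--             # +1 - for symbol itself  ,  +streak_length - size of compression number.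
--             out = min(out, check(x - 1, deletions - deleted) + 1 + streak_length)
--         return out
--
--     return check(len(s) - 1, k)
-- ===== SOURCE B (Python) =====
-- def get_length_of_optim_compression(s: str, k: int) -> int:
--     # Iterative bottom-up tabulation of the compression DP (no recursion, no cache).
--     n = len(s)
--     if k >= n:
--         return 0
--     INF = 10000
--
--     def clen(c: int) -> int:
--         return 0 if c == 1 else len(str(c))
--
--     # T[i][t] = min compressed length of s[:i] when t deletions have already
--     # been spent elsewhere (so k - t remain).  Rows built from i = 0 upward.
--     T = [[0] * (n + 1)]
--     for i in range(1, n + 1):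
--         row = []
--         for t in range(n + 1):
--             rem = k - t
--             best = T[i - 1][t + 1] if rem > 0 else INF
--             keep = 0
--             for x in range(i - 1, -1, -1):
--                 if s[x] == s[i - 1]:
--                     keep += 1
--                 dele = (i - x) - keep
--                 if dele > rem:
--                     break
--                 best = min(best, T[x][t + dele] + 1 + clen(keep))
--             row.append(best)
--         T.append(row)
--     return T[n][0]
-- ===== Notes on version B (the rewrite author's own statement) =====
-- stated objective: alternative
-- what changed: Replaced A's @cache top-down recursion by an explicit bottom-up 2-D table (rows = prefix length, columns = deletions already spent, plus a k>=len(s) -> 0 base case), so B runs with no recursion and no memo cache.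
import Mathlib
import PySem

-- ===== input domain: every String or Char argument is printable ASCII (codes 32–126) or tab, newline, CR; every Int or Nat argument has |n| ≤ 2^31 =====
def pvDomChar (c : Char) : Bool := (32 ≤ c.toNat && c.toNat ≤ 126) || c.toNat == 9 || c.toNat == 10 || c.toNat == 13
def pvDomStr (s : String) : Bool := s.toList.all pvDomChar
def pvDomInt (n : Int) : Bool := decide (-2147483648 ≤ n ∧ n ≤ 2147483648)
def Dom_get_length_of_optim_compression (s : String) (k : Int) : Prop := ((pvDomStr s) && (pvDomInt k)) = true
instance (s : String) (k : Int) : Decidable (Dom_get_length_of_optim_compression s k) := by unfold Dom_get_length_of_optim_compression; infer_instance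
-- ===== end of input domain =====

-- B replaces A's @cache top-down recursion by an explicit bottom-up 2-D table (rows = prefix length,
-- columns = deletions already spent), with a `k >= n -> 0` base case; objective: alternative decomposition.

-- ===== PORT A =====
-- literal port of A's `check(index, deletions)`: Lean argument i corresponds to Python index = i - 1
mutual
def checkA (l : List Char) : Nat → Int → Int
  | 0, _ => 0
  | i+1, d =>
    let out : Int := if d > 0 then checkA l i (d - 1) else 10000
    innerA l (l.getD i ' ') d i 0 0 out
termination_by i _ => 2 * i + 1

-- A's inner `for x in range(index, -1, -1)` loop with its accumulators (streak, deleted, out)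
def innerA (l : List Char) (sym : Char) (d : Int) : Nat → Int → Int → Int → Int
  | x, streak, deleted, out =>
    let streak' : Int := if l.getD x ' ' = sym then streak + 1 else streak
    let deleted' : Int := if l.getD x ' ' = sym then deleted else deleted + 1
    if deleted' > d then out
    else
      let sl : Int := if streak' = 1 then 0 else PySem.Str.len (PySem.Int.toStr streak')
      let out' : Int := min out (checkA l x (d - deleted') + 1 + sl)
      match x with
      | 0 => out'
      | x'+1 => innerA l sym d x' streak' deleted' out'
termination_by x _ _ _ => 2 * x + 2
end

def get_length_of_optim_compression (s : String) (k : Int) : Int :=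
  checkA s.toList s.toList.length k

-- ===== PORT B =====
def clenB (c : Int) : Int := if c = 1 then 0 else PySem.Str.len (PySem.Int.toStr c)

-- B's inner `for x in range(i - 1, -1, -1)` loop (keep counter, dele computed arithmetically)
def innerB (l : List Char) (T : List (List Int)) (i t : Nat) (rem : Int) (c : Char) : Nat → Nat → Int → Int
  | x, keep, best =>
    let keep' : Nat := if l.getD x ' ' = c then keep + 1 else keep
    let dele : Nat := (i - x) - keep'
    if (dele : Int) > rem then best
    else
      let best' : Int := min best ((T.getD x []).getD (t + dele) 0 + 1 + clenB (keep' : Int))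
      match x with
      | 0 => best'
      | x'+1 => innerB l T i t rem c x' keep' best'

def cellB (l : List Char) (T : List (List Int)) (i : Nat) (k : Int) (t : Nat) : Int :=
  let rem : Int := k - (t : Int)
  let best : Int := if rem > 0 then (T.getD (i-1) []).getD (t+1) 0 else 10000
  innerB l T i t rem (l.getD (i-1) ' ') (i-1) 0 best

def rowB (l : List Char) (T : List (List Int)) (i : Nat) (k : Int) (n : Nat) : List Int :=
  (List.range (n+1)).map (cellB l T i k)

def tableB (l : List Char) (k : Int) (n : Nat) : Nat → List (List Int)
  | 0 => [List.replicate (n+1) (0 : Int)]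
  | m+1 => let T := tableB l k n m; T ++ [rowB l T (m+1) k n]

def get_length_of_optim_compression_alt (s : String) (k : Int) : Int :=
  let l := s.toList
  let n := l.length
  if (n : Int) ≤ k then 0
  else ((tableB l k n n).getD n []).getD 0 0

-- ===== PRECONDITION & SPEC =====
def Spec_get_length_of_optim_compression (s : String) (k : Int) (out : Int) : Prop := out = get_length_of_optim_compression_alt s k
instance (s : String) (k : Int) (out : Int) : Decidable (Spec_get_length_of_optim_compression s k out) := by unfold Spec_get_length_of_optim_compression; infer_instance

-- ===== CLAIM (what is proved, stated in full; the proofs are below) =====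
def Claim_equal_get_length_of_optim_compression : Prop := ∀ (s : String) (k : Int), Dom_get_length_of_optim_compression s k → Spec_get_length_of_optim_compression s k (get_length_of_optim_compression s k)

-- ===== LEMMAS AND PROOFS =====


lemma sl_nonneg (z : Int) : 0 ≤ (if z = 1 then (0:Int) else PySem.Str.len (PySem.Int.toStr z)) := by
  split_ifs
  · exact le_rfl
  · simp [PySem.Str.len_eq]

lemma innerA_le (l : List Char) (sym : Char) (d : Int) :
    ∀ (x : Nat) (streak deleted out : Int), innerA l sym d x streak deleted out ≤ out := by
  intro x
  induction x with
  | zero =>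
    intro streak deleted out
    rw [innerA]; (try dsimp only)
    by_cases hbr : (if l.getD 0 ' ' = sym then deleted else deleted + 1) > d
    · simp only [if_pos hbr]; exact le_rfl
    · simp only [if_neg hbr]; exact min_le_left _ _
  | succ x' ih =>
    intro streak deleted out
    rw [innerA]; (try dsimp only)
    by_cases hbr : (if l.getD (x' + 1) ' ' = sym then deleted else deleted + 1) > d
    · simp only [if_pos hbr]; exact le_rfl
    · simp only [if_neg hbr]; exact le_trans (ih _ _ _) (min_le_left _ _)

lemma innerA_nonneg_of (l : List Char) (sym : Char) (d : Int) :
    ∀ (x : Nat) (streak deleted out : Int),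
      (∀ j d', j ≤ x → 0 ≤ checkA l j d') → 0 ≤ out → 0 ≤ innerA l sym d x streak deleted out := by
  intro x
  induction x with
  | zero =>
    intro streak deleted out H hout
    rw [innerA]; (try dsimp only)
    by_cases hbr : (if l.getD 0 ' ' = sym then deleted else deleted + 1) > d
    · simp only [if_pos hbr]; exact hout
    · simp only [if_neg hbr]
      refine le_min hout ?_
      have h0 := H 0 (d - (if l.getD 0 ' ' = sym then deleted else deleted + 1)) le_rfl
      have h1 := sl_nonneg (if l.getD 0 ' ' = sym then streak + 1 else streak)
      omega
  | succ x' ih =>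
    intro streak deleted out H hout
    rw [innerA]; (try dsimp only)
    by_cases hbr : (if l.getD (x' + 1) ' ' = sym then deleted else deleted + 1) > d
    · simp only [if_pos hbr]; exact hout
    · simp only [if_neg hbr]
      refine ih _ _ _ (fun j d' hj => H j d' (by omega)) (le_min hout ?_)
      have h0 := H (x' + 1) (d - (if l.getD (x' + 1) ' ' = sym then deleted else deleted + 1)) le_rfl
      have h1 := sl_nonneg (if l.getD (x' + 1) ' ' = sym then streak + 1 else streak)
      omega

lemma checkA_nonneg (l : List Char) : ∀ (i : Nat) (d : Int), 0 ≤ checkA l i d := by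
  intro i
  induction i using Nat.strong_induction_on with
  | _ i ih =>
    match i with
    | 0 => intro d; rw [checkA]
    | i + 1 =>
      intro d
      rw [checkA]
      refine innerA_nonneg_of l _ d i _ _ _ (fun j d' hj => ih j (by omega) d') ?_
      by_cases h : d > 0
      · rw [if_pos h]; exact ih i (by omega) _
      · rw [if_neg h]; norm_num

lemma checkA_zero (l : List Char) : ∀ (i : Nat) (d : Int), (i : Int) ≤ d → checkA l i d = 0 := by
  intro i
  induction i with
  | zero => intro d _; rw [checkA]
  | succ i ih =>
    intro d h
    have hd : d > 0 := by omega
    rw [checkA]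
    rw [if_pos hd, ih (d - 1) (by omega)]
    exact le_antisymm (innerA_le l _ d i 0 0 0)
      (innerA_nonneg_of l _ d i 0 0 0 (fun j d' _ => checkA_nonneg l j d') le_rfl)

lemma tableB_length (l : List Char) (k : Int) (n : Nat) : ∀ (m : Nat), (tableB l k n m).length = m + 1 := by
  intro m
  induction m with
  | zero => rfl
  | succ m ih => simp [tableB, ih]

lemma tableB_getD_mono (l : List Char) (k : Int) (n : Nat) :
    ∀ (m' m i : Nat), i ≤ m → m ≤ m' →
      (tableB l k n m').getD i [] = (tableB l k n m).getD i [] := by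
  intro m'
  induction m' with
  | zero =>
    intro m i h1 h2
    have : m = 0 := by omega
    subst this; rfl
  | succ m' ih =>
    intro m i h1 h2
    rcases Nat.eq_or_lt_of_le h2 with h | h
    · subst h; rfl
    · rw [tableB]
      rw [List.getD_eq_getElem?_getD, List.getElem?_append_left (by rw [tableB_length]; omega),
        ← List.getD_eq_getElem?_getD]
      exact ih m i h1 (by omega)

lemma inner_corr (l : List Char) (k : Int) (hk : k < (l.length : Int)) (i : Nat) (hi : i < l.length)
    (T : List (List Int))
    (hT : ∀ x t, x ≤ i → t ≤ l.length → (T.getD x []).getD t 0 = checkA l x (k - (t : Int)))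
    (t : Nat) (ht : t ≤ l.length) :
    ∀ (x keep : Nat) (streak deleted out : Int), x ≤ i → streak = (keep : Int) →
      streak + deleted = ((i - x : Nat) : Int) → 0 ≤ deleted →
      innerB l T (i+1) t (k - (t : Int)) (l.getD i ' ') x keep out
        = innerA l (l.getD i ' ') (k - (t : Int)) x streak deleted out := by
  intro x
  induction x with
  | zero =>
    intro keep streak deleted out hx hks hsum hdel
    rw [innerB, innerA]; (try dsimp only)
    by_cases hc : l.getD 0 ' ' = l.getD i ' '
    · simp only [if_pos hc]
      have hD : ((i + 1 - 0 - (keep + 1) : Nat) : Int) = deleted := by omega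
      rw [hD]
      by_cases hbr : deleted > k - (t : Int)
      · simp only [if_pos hbr]
      · simp only [if_neg hbr]
        have h1 : t + (i + 1 - 0 - (keep + 1)) ≤ l.length := by omega
        rw [hT 0 _ (Nat.zero_le _) h1]
        have h2 : k - ((t + (i + 1 - 0 - (keep + 1)) : Nat) : Int) = k - (t : Int) - deleted := by omega
        rw [h2]
        have h3 : clenB ((keep + 1 : Nat) : Int)
            = (if streak + 1 = 1 then 0 else PySem.Str.len (PySem.Int.toStr (streak + 1))) := by
          unfold clenB
          have hz : ((keep + 1 : Nat) : Int) = streak + 1 := by omega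
          rw [hz]
        rw [h3]
    · simp only [if_neg hc]
      have hD : ((i + 1 - 0 - keep : Nat) : Int) = deleted + 1 := by omega
      rw [hD]
      by_cases hbr : deleted + 1 > k - (t : Int)
      · simp only [if_pos hbr]
      · simp only [if_neg hbr]
        have h1 : t + (i + 1 - 0 - keep) ≤ l.length := by omega
        rw [hT 0 _ (Nat.zero_le _) h1]
        have h2 : k - ((t + (i + 1 - 0 - keep) : Nat) : Int) = k - (t : Int) - (deleted + 1) := by omega
        rw [h2]
        have h3 : clenB ((keep : Nat) : Int)
            = (if streak = 1 then 0 else PySem.Str.len (PySem.Int.toStr streak)) := by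
          unfold clenB
          rw [← hks]
        rw [h3]
  | succ x' ih =>
    intro keep streak deleted out hx hks hsum hdel
    rw [innerB, innerA]; (try dsimp only)
    by_cases hc : l.getD (x' + 1) ' ' = l.getD i ' '
    · simp only [if_pos hc]
      have hD : ((i + 1 - (x' + 1) - (keep + 1) : Nat) : Int) = deleted := by omega
      rw [hD]
      by_cases hbr : deleted > k - (t : Int)
      · simp only [if_pos hbr]
      · simp only [if_neg hbr]
        have h1 : t + (i + 1 - (x' + 1) - (keep + 1)) ≤ l.length := by omega
        rw [hT (x' + 1) _ hx h1]
        have h2 : k - ((t + (i + 1 - (x' + 1) - (keep + 1)) : Nat) : Int)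
            = k - (t : Int) - deleted := by omega
        rw [h2]
        have h3 : clenB ((keep + 1 : Nat) : Int)
            = (if streak + 1 = 1 then 0 else PySem.Str.len (PySem.Int.toStr (streak + 1))) := by
          unfold clenB
          have hz : ((keep + 1 : Nat) : Int) = streak + 1 := by omega
          rw [hz]
        rw [h3]
        exact ih (keep + 1) (streak + 1) deleted _ (by omega) (by push_cast; omega) (by omega) (by omega)
    · simp only [if_neg hc]
      have hD : ((i + 1 - (x' + 1) - keep : Nat) : Int) = deleted + 1 := by omega
      rw [hD]
      by_cases hbr : deleted + 1 > k - (t : Int)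
      · simp only [if_pos hbr]
      · simp only [if_neg hbr]
        have h1 : t + (i + 1 - (x' + 1) - keep) ≤ l.length := by omega
        rw [hT (x' + 1) _ hx h1]
        have h2 : k - ((t + (i + 1 - (x' + 1) - keep) : Nat) : Int)
            = k - (t : Int) - (deleted + 1) := by omega
        rw [h2]
        have h3 : clenB ((keep : Nat) : Int)
            = (if streak = 1 then 0 else PySem.Str.len (PySem.Int.toStr streak)) := by
          unfold clenB
          rw [← hks]
        rw [h3]
        exact ih keep streak (deleted + 1) _ (by omega) hks (by omega) (by omega)

lemma cell_corr (l : List Char) (k : Int) (hk : k < (l.length : Int)) (i : Nat) (hi : i < l.length)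
    (T : List (List Int))
    (hT : ∀ x t, x ≤ i → t ≤ l.length → (T.getD x []).getD t 0 = checkA l x (k - (t : Int)))
    (t : Nat) (ht : t ≤ l.length) :
    cellB l T (i+1) k t = checkA l (i+1) (k - (t : Int)) := by
  unfold cellB
  rw [checkA]; (try dsimp only)
  rw [show i + 1 - 1 = i from rfl]
  have hbest : (if k - (t : Int) > 0 then (T.getD i []).getD (t + 1) 0 else (10000 : Int))
      = (if k - (t : Int) > 0 then checkA l i (k - (t : Int) - 1) else (10000 : Int)) := by
    by_cases h : k - (t : Int) > 0
    · rw [if_pos h, if_pos h, hT i (t + 1) le_rfl (by omega)]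
      congr 1
      push_cast
      ring
    · rw [if_neg h, if_neg h]
  rw [hbest]
  exact inner_corr l k hk i hi T hT t ht i 0 0 0 _ le_rfl (by simp) (by simp) le_rfl

lemma table_corr (l : List Char) (k : Int) (hk : k < (l.length : Int)) :
    ∀ (m : Nat), m ≤ l.length → ∀ (i : Nat), i ≤ m → ∀ (t : Nat), t ≤ l.length →
      ((tableB l k l.length m).getD i []).getD t 0 = checkA l i (k - (t : Int)) := by
  intro m
  induction m with
  | zero =>
    intro _ i hi t ht
    have : i = 0 := by omega
    subst this
    rw [checkA]
    show ((List.replicate (l.length + 1) (0:Int)).getD t 0) = 0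
    rw [List.getD_eq_getElem?_getD, List.getElem?_replicate]
    split_ifs <;> rfl
  | succ m ihm =>
    intro hm i hi t ht
    rcases Nat.lt_or_ge i (m + 1) with h | h
    · rw [tableB_getD_mono l k l.length (m + 1) m i (by omega) (by omega)]
      exact ihm (by omega) i (by omega) t ht
    · have hieq : i = m + 1 := by omega
      subst hieq
      rw [tableB]
      have hrow : ∀ (R : List Int), (tableB l k l.length m ++ [R]).getD (m + 1) [] = R := by
        intro R
        conv_lhs => rw [show (m + 1) = (tableB l k l.length m).length from (tableB_length l k l.length m).symm]
        rw [List.getD_eq_getElem?_getD, List.getElem?_concat_length]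
        rfl
      rw [hrow]
      unfold rowB
      rw [PySem.List.getD_map_range _ _ _ _ (by omega)]
      exact cell_corr l k hk m (by omega) (tableB l k l.length m)
        (fun x t' hx ht' => ihm (by omega) x (by omega) t' ht') t ht

-- ===== VERDICT (by name: the statement is the Claim_ definition above) =====
theorem get_length_of_optim_compression_spec : Claim_equal_get_length_of_optim_compression := by
  intro s k _
  unfold Spec_get_length_of_optim_compression get_length_of_optim_compression get_length_of_optim_compression_alt
  by_cases h : (s.toList.length : Int) ≤ k
  · simp only [h, if_pos]
    exact checkA_zero s.toList s.toList.length k h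
  · simp only [if_neg h]
    have := table_corr s.toList k (by omega) s.toList.length le_rfl s.toList.length le_rfl 0 (Nat.zero_le _)
    simpa using this.symm
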